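-- pv_equiv track=rewrite | github.com/vtaboga/PEPS | off_line_computation/utils.py | group_configs
-- ===== SOURCE A (Python) =====
-- import itertools
-- import copy
-- from typing import List, Dict
--
-- def group_configs(grid: Dict, start_number: int = 1) -> Dict:
--     """
--     :param grid: dictionary used for a grid search
--     :param start_number: number of the first configuration to consider
--     :return: The id of the configuration files grouped by configurations (for all the seeds)
--     """
--     keys, values = zip(*grid.items())
--     experiments = [dict(zip(keys, v)) for v in itertools.product(*values)]
--
--     groups = {}
--     for i, exp in enumerate(experiments):
--         exp_copy = copy.deepcopy(exp)
--         if 'seed' in exp_copy: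
--             del exp_copy['seed']
--         key = tuple(sorted(exp_copy.items()))
--         if key not in groups:
--             groups[key] = []
--         groups[key].append(i + start_number)
--
--     return groups
-- ===== SOURCE B (Python) =====
-- def group_configs(grid, start_number=1):
--     """Recursive build over the grid axes instead of enumerating the full
--     cartesian product: each axis multiplies the group table computed for the
--     remaining axes, the seed axis multiplying only the id lists."""
--     axes = list(grid.items())
--     if not axes:
--         raise ValueError("empty grid")
--     flat, _ = _build(axes)
--     groups = {}
--     for key, ids in flat:
--         groups.setdefault(key, []).extend(ids)
--     return {key: sorted(start_number + r for r in ids) for key, ids in groups.items()}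
--
--
-- def _build(axes):
--     """Return (list of (sorted key tuple, ids), total number of configs) for
--     the given axes, ids being 0-based offsets into the cartesian product."""
--     if not axes:
--         return [((), [0])], 1
--     (k, vs), rest = axes[0], axes[1:]
--     g, w = _build(rest)
--     n = len(vs)
--     if n == 0:
--         return [], 0
--     if k == 'seed':
--         return [(key, [a * w + r for a in range(n) for r in ids]) for key, ids in g], n * w
--     return [(tuple(sorted(key + ((k, x),))), [a * w + r for r in ids])
--             for a, x in enumerate(vs) for key, ids in g], n * w
-- ===== Notes on version B (the rewrite author's own statement) =====
-- stated objective: alternative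
-- what changed: B replaces A's enumeration of the full cartesian product (building every experiment dict, deleting 'seed', sorting its items and appending ids one by one) by a recursive build over the grid axes that multiplies a group table computed for the remaining axes, the seed axis multiplying only the id lists via offset arithmetic.
import Mathlib
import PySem

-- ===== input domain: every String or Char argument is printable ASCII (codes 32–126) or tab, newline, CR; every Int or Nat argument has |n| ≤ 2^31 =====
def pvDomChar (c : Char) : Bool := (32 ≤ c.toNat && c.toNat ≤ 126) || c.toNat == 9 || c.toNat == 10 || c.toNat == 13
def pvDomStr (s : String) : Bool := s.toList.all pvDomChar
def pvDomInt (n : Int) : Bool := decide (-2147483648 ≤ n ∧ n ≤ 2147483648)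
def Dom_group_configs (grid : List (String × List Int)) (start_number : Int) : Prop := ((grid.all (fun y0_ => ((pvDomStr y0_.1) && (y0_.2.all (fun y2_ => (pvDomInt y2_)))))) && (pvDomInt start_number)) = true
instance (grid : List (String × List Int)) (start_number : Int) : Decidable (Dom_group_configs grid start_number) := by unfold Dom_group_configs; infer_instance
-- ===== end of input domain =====

-- B replaces A's full cartesian-product enumeration by a recursive build over the axes
-- (objective: alternative decomposition; same asymptotic cost up to the product size).

-- ===== PORT A =====
-- itertools.product(*values), in CPython's order
def pyProd : List (List Int) → List (List Int)
  | [] => [[]]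
  | vs :: rest => vs.flatMap (fun x => (pyProd rest).map (fun c => x :: c))

def group_configs (grid : List (String × List Int)) (start_number : Int) : List (List (String × Int) × List Int) :=
  let keys := grid.map Prod.fst
  let values := grid.map Prod.snd
  let experiments := (pyProd values).map (fun v => PySem.Dict.ofList (keys.zip v))
  let groups := (PySem.List.enumerate experiments 0).foldl
    (fun (g : PySem.Dict (List (String × Int)) (List Int)) ie =>
      let expCopy := if ie.2.contains "seed" then ie.2.erase "seed" else ie.2
      let key := PySem.List.sorted2 expCopy.items Prod.fst Prod.snd false
      let g1 := if g.contains key then g else g.insert key []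
      g1.insert key (g1.getD key [] ++ [ie.1 + start_number]))
    PySem.Dict.empty
  groups.items

-- ===== PORT B =====
-- _build from Source B: (groups over these axes with 0-based offsets, total config count)
def pyBuild : List (String × List Int) → List (List (String × Int) × List Int) × Int
  | [] => ([([], [0])], 1)
  | (k, vs) :: rest =>
    let gw := pyBuild rest
    let n : Int := vs.length
    if vs.length = 0 then ([], 0)
    else if k = "seed" then
      (gw.1.map (fun p => (p.1, (PySem.List.pyRange 0 n 1).flatMap (fun a => p.2.map (fun r => a * gw.2 + r)))), n * gw.2)
    else
      ((PySem.List.enumerate vs 0).flatMap (fun ax => gw.1.map (fun p =>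
          (PySem.List.sorted2 (p.1 ++ [(k, ax.2)]) Prod.fst Prod.snd false,
           p.2.map (fun r => ax.1 * gw.2 + r)))), n * gw.2)

def group_configs_alt (grid : List (String × List Int)) (start_number : Int) : List (List (String × Int) × List Int) :=
  let flat := (pyBuild grid).1
  let groups := flat.foldl
    (fun (g : PySem.Dict (List (String × Int)) (List Int)) p =>
      let g1 := if g.contains p.1 then g else g.insert p.1 []
      g1.insert p.1 (g1.getD p.1 [] ++ p.2))
    PySem.Dict.empty
  groups.items.map (fun p => (p.1, PySem.List.sorted (p.2.map (fun r => start_number + r)) (fun x => x) false))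

-- ===== PRECONDITION & SPEC =====
-- Pre_ excludes the empty grid, where both A and B raise ValueError, and grids whose key
-- list repeats a key, which cannot arise from A's Python dict argument.
def Pre_group_configs (grid : List (String × List Int)) (start_number : Int) : Prop :=
  grid ≠ [] ∧ (grid.map Prod.fst).Nodup
instance (grid : List (String × List Int)) (start_number : Int) : Decidable (Pre_group_configs grid start_number) := by unfold Pre_group_configs; infer_instance

def pvWitness_group_configs : (List (String × List Int)) × Int :=
  ([("lr", [1, 2]), ("seed", [10, 20, 30])], 1)

def Spec_group_configs (grid : List (String × List Int)) (start_number : Int) (out : List (List (String × Int) × List Int)) : Prop := out = group_configs_alt grid start_number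
instance (grid : List (String × List Int)) (start_number : Int) (out : List (List (String × Int) × List Int)) : Decidable (Spec_group_configs grid start_number out) := by unfold Spec_group_configs; infer_instance

-- ===== CLAIM (what is proved, stated in full; the proofs are below) =====
def Claim_equal_group_configs : Prop := ∀ (grid : List (String × List Int)) (start_number : Int), Dom_group_configs grid start_number → Pre_group_configs grid start_number → Spec_group_configs grid start_number (group_configs grid start_number)


-- ===== LEMMAS AND PROOFS =====

-- Proof-side canonical sort: Python's tuple order on (String, Int) is the lexicographic order
def sortK (xs : List (String × Int)) : List (String × Int) :=
  PySem.List.sorted xs (fun p => toLex p) false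

def tagIdx : List (List (String × Int)) → Int → List (List (String × Int) × Int)
  | [], _ => []
  | k :: t, s => (k, s) :: tagIdx t (s + 1)

def expandG (G : List (List (String × Int) × List Int)) : List (List (String × Int) × Int) :=
  G.flatMap (fun p => p.2.map (fun r => (p.1, r)))

def firsts {α : Type} [DecidableEq α] : List α → List α
  | [] => []
  | x :: t => x :: (firsts t).filter (fun y => decide (y ≠ x))

def collectL (L : List (List (String × Int) × List Int)) (k : List (String × Int)) : List Int :=
  (L.filter (fun p => decide (p.1 = k))).flatMap Prod.snd

def gstep (g : PySem.Dict (List (String × Int)) (List Int)) (p : List (String × Int) × List Int) :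
    PySem.Dict (List (String × Int)) (List Int) :=
  let g1 := if g.contains p.1 then g else g.insert p.1 []
  g1.insert p.1 (g1.getD p.1 [] ++ p.2)

def keyA (keys : List String) (v : List Int) : List (String × Int) :=
  sortK ((keys.zip v).filter (fun p => !(p.1 == "seed")))

def KA (axes : List (String × List Int)) : List (List (String × Int)) :=
  (pyProd (axes.map Prod.snd)).map (keyA (axes.map Prod.fst))

-- ---- sort bridge ----
theorem sorted2_eq_sortK (xs : List (String × Int)) :
    PySem.List.sorted2 xs Prod.fst Prod.snd false = sortK xs := by
  have hbf : (fun (a b : String × Int) =>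
        decide (Prod.fst a < Prod.fst b) ||
          (!decide (Prod.fst b < Prod.fst a) && decide (Prod.snd a < Prod.snd b))) =
      (fun (a b : String × Int) => decide (toLex a < toLex b)) := by
    funext a b
    rcases lt_trichotomy a.1 b.1 with h | h | h
    · simp [Prod.Lex.toLex_lt_toLex, h]
    · simp [Prod.Lex.toLex_lt_toLex, h, lt_irrefl]
    · simp [Prod.Lex.toLex_lt_toLex, h, lt_asymm h, (ne_of_gt h)]
  show xs.foldl (fun acc x => PySem.List.insertBy
      (fun a b => decide (Prod.fst a < Prod.fst b) ||
        (!decide (Prod.fst b < Prod.fst a) && decide (Prod.snd a < Prod.snd b))) x acc) [] =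
    xs.foldl (fun acc x => PySem.List.insertBy
      (fun a b => decide (toLex a < toLex b)) x acc) []
  rw [hbf]

theorem sortK_congr_perm {X Y : List (String × Int)} (h : X.Perm Y) : sortK X = sortK Y := PySem.List.sorted_eq_sorted_of_perm X Y (fun p => toLex p) toLex.injective h

theorem mem_sortK {q : String × Int} {X : List (String × Int)} : q ∈ sortK X ↔ q ∈ X := PySem.List.mem_sorted X (fun p => toLex p) false q

theorem sortK_sortK (X : List (String × Int)) : sortK (sortK X) = sortK X := PySem.List.sorted_sorted X (fun p => toLex p)

-- ---- firsts ----
theorem mem_firsts {α : Type} [DecidableEq α] (l : List α) (x : α) : x ∈ firsts l ↔ x ∈ l := by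
  induction l with
  | nil => simp [firsts]
  | cons a t ih =>
    simp only [firsts, List.mem_cons, List.mem_filter, ih, decide_eq_true_eq]
    by_cases hx : x = a
    · simp [hx]
    · simp [hx]

theorem firsts_append {α : Type} [DecidableEq α] (xs ys : List α) :
    firsts (xs ++ ys) = firsts xs ++ (firsts ys).filter (fun y => decide (y ∉ xs)) := by
  induction xs with
  | nil => simp [firsts, List.not_mem_nil]
  | cons a xs ih =>
    simp only [List.cons_append, firsts, ih, List.filter_append, List.filter_filter]
    congr 2
    apply List.filter_congr
    intro y hy
    by_cases h1 : y = a <;> by_cases h2 : y ∈ xs <;> simp [h1, h2]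

theorem firsts_map_injOn {α β : Type} [DecidableEq α] [DecidableEq β] (f : α → β) (l : List α)
    (h : ∀ x ∈ l, ∀ y ∈ l, f x = f y → x = y) : firsts (l.map f) = (firsts l).map f := by
  induction l with
  | nil => simp [firsts]
  | cons a t ih =>
    have ih' := ih (fun x hx y hy => h x (List.mem_cons_of_mem _ hx) y (List.mem_cons_of_mem _ hy))
    simp only [List.map_cons, firsts, ih']
    congr 1
    rw [List.filter_map]
    congr 1
    apply List.filter_congr
    intro y hy
    have hyt : y ∈ t := (mem_firsts t y).mp hy
    simp only [Function.comp_apply, decide_eq_decide]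
    constructor
    · intro hne he; exact hne (congrArg f he)
    · intro hne he; exact hne (h y (List.mem_cons_of_mem _ hyt) a List.mem_cons_self he)

theorem firsts_flatten {α : Type} [DecidableEq α] (M : List (List α))
    (h : ∀ b1 ∈ M, ∀ b2 ∈ M, b1 = b2 ∨ ∀ z ∈ b1, z ∉ b2) :
    firsts M.flatten = (firsts M).flatMap firsts := by
  induction M with
  | nil => simp [firsts]
  | cons b M ih =>
    have hM : ∀ b1 ∈ M, ∀ b2 ∈ M, b1 = b2 ∨ ∀ z ∈ b1, z ∉ b2 :=
      fun b1 h1 b2 h2 => h b1 (by simp [h1]) b2 (by simp [h2])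
    simp only [List.flatten_cons, firsts_append, ih hM, firsts, List.flatMap_cons]
    congr 1
    have haux : ∀ (N : List (List α)), (∀ c ∈ N, c = b ∨ ∀ z ∈ c, z ∉ b) →
        ((N.flatMap firsts).filter (fun z => decide (z ∉ b)) =
          (N.filter (fun c => decide (c ≠ b))).flatMap firsts) := by
      intro N
      induction N with
      | nil => intro _; simp
      | cons c N ihN =>
        intro hc
        have hrec := ihN (fun c' h' => hc c' (List.mem_cons_of_mem _ h'))
        simp only [List.flatMap_cons, List.filter_append, hrec, List.filter_cons]
        by_cases hcb : c = b
        · subst hcb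
          have h0 : (firsts c).filter (fun z => decide (z ∉ c)) = [] := by
            rw [List.filter_eq_nil_iff]
            intro z hz
            simp only [decide_eq_true_eq, Decidable.not_not]
            exact (mem_firsts c z).mp hz
          simp [h0, mem_firsts]
        · rcases hc c List.mem_cons_self with hcb' | hdisj
          · exact absurd hcb' hcb
          · have h1 : (firsts c).filter (fun z => decide (z ∉ b)) = firsts c := by
              apply List.filter_eq_self.mpr
              intro z hz
              simp [hdisj z ((mem_firsts c z).mp hz)]
            simp [h1, hcb, mem_firsts]
            exact hdisj
    apply haux
    intro c hcm
    exact h c (List.mem_cons_of_mem _ ((mem_firsts M c).mp hcm)) b List.mem_cons_self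

theorem firsts_flatMap_const {α β : Type} [DecidableEq β] (l : List α) (R : List β) (hl : l ≠ []) :
    firsts (l.flatMap (fun _ => R)) = firsts R := by
  induction l with
  | nil => exact absurd rfl hl
  | cons a t ih =>
    by_cases ht : t = []
    · subst ht; simp
    · simp only [List.flatMap_cons, firsts_append, ih ht]
      have h0 : (firsts R).filter (fun y => decide (y ∉ R)) = [] := by
        rw [List.filter_eq_nil_iff]
        intro z hz
        simp only [decide_eq_true_eq, Decidable.not_not]
        exact (mem_firsts R z).mp hz
      simp [h0, mem_firsts]

-- ---- permutation tools ----
theorem flatMap_perm_congr {α γ : Type} (l : List α) (f g : α → List γ)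
    (h : ∀ x ∈ l, (f x).Perm (g x)) : (l.flatMap f).Perm (l.flatMap g) := by
  induction l with
  | nil => simp
  | cons a t ih =>
    simp only [List.flatMap_cons]
    exact (h a List.mem_cons_self).append (ih (fun x hx => h x (List.mem_cons_of_mem _ hx)))

theorem perm_flatMap_append {α γ : Type} (l : List α) (p q : α → List γ) :
    (l.flatMap (fun b => p b ++ q b)).Perm (l.flatMap p ++ l.flatMap q) := by
  induction l with
  | nil => simp
  | cons a t ih =>
    simp only [List.flatMap_cons]
    refine ((ih.append_left (p a ++ q a))).trans ?_
    simp only [List.append_assoc]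
    refine List.Perm.append_left (p a) ?_
    rw [← List.append_assoc]
    refine (List.perm_append_comm.append_right (t.flatMap q)).trans ?_
    rw [List.append_assoc]

theorem perm_flatMap_swap {α β γ : Type} (l1 : List α) (l2 : List β) (f : α → β → List γ) :
    (l1.flatMap (fun a => l2.flatMap (fun b => f a b))).Perm
      (l2.flatMap (fun b => l1.flatMap (fun a => f a b))) := by
  induction l1 with
  | nil =>
    have h0 : ∀ (l : List β), (l.flatMap fun _ => ([] : List γ)) = [] := by
      intro l; induction l with
      | nil => rfl
      | cons x t ih => simp [List.flatMap_cons, ih]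
    simp [h0]
  | cons a t ih =>
    simp only [List.flatMap_cons]
    refine (ih.append_left (l2.flatMap (f a))).trans ?_
    exact (perm_flatMap_append l2 (fun b => f a b) (fun b => t.flatMap (fun a' => f a' b))).symm

-- ---- tagIdx ----
theorem map_fst_tagIdx (l : List (List (String × Int))) (s : Int) :
    (tagIdx l s).map Prod.fst = l := by
  induction l generalizing s with
  | nil => rfl
  | cons k t ih => simp [tagIdx, ih]

theorem tagIdx_append (xs ys : List (List (String × Int))) (s : Int) :
    tagIdx (xs ++ ys) s = tagIdx xs s ++ tagIdx ys (s + xs.length) := by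
  induction xs generalizing s with
  | nil => simp [tagIdx]
  | cons k t ih =>
    simp only [List.cons_append, tagIdx, ih, List.length_cons]
    have hz : s + 1 + (t.length : Int) = s + ((t.length : Int) + 1) := by ring
    rw [hz]
    push_cast
    ring_nf

theorem tagIdx_shift (l : List (List (String × Int))) (s : Int) :
    tagIdx l s = (tagIdx l 0).map (fun q => (q.1, s + q.2)) := by
  have haux : ∀ (l : List (List (String × Int))) (s d : Int),
      tagIdx l (s + d) = (tagIdx l s).map (fun q => (q.1, d + q.2)) := by
    intro l
    induction l with
    | nil => intro s d; rfl
    | cons k t ih =>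
      intro s d
      simp only [tagIdx, List.map_cons]
      refine congrArg₂ _ (by rw [Int.add_comm s d]) ?_
      have hz : s + d + 1 = (s + 1) + d := by ring
      rw [hz, ih]
  have := haux l 0 s
  rw [Int.zero_add] at this
  exact this

theorem tagIdx_map (l : List (List (String × Int))) (f : List (String × Int) → List (String × Int)) (s : Int) :
    tagIdx (l.map f) s = (tagIdx l s).map (fun q => (f q.1, q.2)) := by
  induction l generalizing s with
  | nil => rfl
  | cons k t ih => simp [tagIdx, ih]

theorem tagIdx_pairwise (l : List (List (String × Int))) (s : Int) :
    (tagIdx l s).Pairwise (fun p q => p.2 < q.2) := by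
  have hlb : ∀ (l : List (List (String × Int))) (s : Int) (q : List (String × Int) × Int),
      q ∈ tagIdx l s → s ≤ q.2 := by
    intro l
    induction l with
    | nil => intro s q hq; simp [tagIdx] at hq
    | cons k t ih =>
      intro s q hq
      simp only [tagIdx, List.mem_cons] at hq
      rcases hq with h | h
      · subst h; omega
      · have := ih (s + 1) q h; omega
  induction l generalizing s with
  | nil => exact List.Pairwise.nil
  | cons k t ih =>
    refine List.Pairwise.cons ?_ (ih (s + 1))
    intro q hq
    have := hlb t (s + 1) q hq
    omega

theorem enumerate_cons {α : Type} (x : α) (t : List α) (s : Int) :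
    PySem.List.enumerate (x :: t) s = (s, x) :: PySem.List.enumerate t (s + 1) := rfl

theorem tag_flatMap_enum {α : Type} (l : List α) (F : α → List (List (String × Int))) (W : Int)
    (hW : ∀ x ∈ l, ((F x).length : Int) = W) (a0 : Int) :
    tagIdx (l.flatMap F) (a0 * W) =
      (PySem.List.enumerate l a0).flatMap (fun ax => tagIdx (F ax.2) (ax.1 * W)) := by
  induction l generalizing a0 with
  | nil => rfl
  | cons x t ih =>
    have hW' : ∀ y ∈ t, ((F y).length : Int) = W := fun y hy => hW y (List.mem_cons_of_mem _ hy)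
    simp only [List.flatMap_cons, tagIdx_append, enumerate_cons]
    have hx : a0 * W + ((F x).length : Int) = (a0 + 1) * W := by
      rw [hW x List.mem_cons_self]; ring
    rw [hx, ih hW']

-- ---- enumerate ----
theorem enumerate_map {α β : Type} (l : List α) (f : α → β) (s : Int) :
    PySem.List.enumerate (l.map f) s = (PySem.List.enumerate l s).map (fun p => (p.1, f p.2)) := by
  induction l generalizing s with
  | nil => rfl
  | cons x t ih => simp [enumerate_cons, ih]

theorem enumerate_mem_snd {α : Type} {l : List α} {s : Int} {p : Int × α}
    (h : p ∈ PySem.List.enumerate l s) : p.2 ∈ l := by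
  induction l generalizing s with
  | nil => simp [PySem.List.enumerate] at h
  | cons x t ih =>
    rw [enumerate_cons] at h
    rcases List.mem_cons.mp h with h1 | h1
    · subst h1; exact List.mem_cons_self
    · exact List.mem_cons_of_mem _ (ih h1)

theorem flatMap_enumerate_snd {α γ : Type} (l : List α) (F : α → List γ) (s : Int) :
    (PySem.List.enumerate l s).flatMap (fun ax => F ax.2) = l.flatMap F := by
  induction l generalizing s with
  | nil => rfl
  | cons x t ih => simp [enumerate_cons, ih]

theorem flatMap_enumerate_fst {α γ : Type} (l : List α) (F : Int → List γ) (s : Int) :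
    (PySem.List.enumerate l s).flatMap (fun ax => F ax.1) =
      (PySem.List.pyRange s (s + l.length) 1).flatMap F := by
  induction l generalizing s with
  | nil =>
    rw [PySem.List.pyRange_one_eq_nil (by simp)]
    rfl
  | cons x t ih =>
    rw [enumerate_cons]
    simp only [List.flatMap_cons, ih]
    have hb : s < s + ((x :: t).length : Int) := by
      push_cast [List.length_cons]
      omega
    rw [PySem.List.pyRange_one_cons hb, List.flatMap_cons]
    have hz : s + 1 + (t.length : Int) = s + (((x :: t).length : Int)) := by
      simp only [List.length_cons]
      push_cast
      ring
    rw [hz]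

-- ---- expandG ----
theorem expand_map (G : List (List (String × Int) × List Int))
    (f : List (String × Int) → List (String × Int)) (h : Int → Int) :
    expandG (G.map (fun p => (f p.1, p.2.map h))) = (expandG G).map (fun q => (f q.1, h q.2)) := by
  simp only [expandG, List.flatMap_map, List.map_flatMap, List.map_map]
  rfl

theorem expand_flatMap {α : Type} (l : List α) (f : α → List (List (String × Int) × List Int)) :
    expandG (l.flatMap f) = l.flatMap (fun x => expandG (f x)) := by
  simp only [expandG, List.flatMap_assoc]

theorem collect_expand (G : List (List (String × Int) × List Int)) (k : List (String × Int)) :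
    ((expandG G).filter (fun q => decide (q.1 = k))).map Prod.snd = collectL G k := by
  induction G with
  | nil => rfl
  | cons p t ih =>
    simp only [expandG, List.flatMap_cons, List.filter_append, List.map_append, collectL,
      List.filter_cons] at *
    by_cases hp : p.1 = k
    · have hkeep : (p.2.map (fun r => (p.1, r))).filter (fun q => decide (q.1 = k)) =
          p.2.map (fun r => (p.1, r)) := by
        apply List.filter_eq_self.mpr
        intro z hz
        rcases List.mem_map.mp hz with ⟨r, _, rfl⟩
        simp [hp]
      rw [hkeep]
      simp [hp, List.map_map, Function.comp, ih]
    · have hdrop : (p.2.map (fun r => (p.1, r))).filter (fun q => decide (q.1 = k)) = [] := by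
        apply List.filter_eq_nil_iff.mpr
        intro z hz
        rcases List.mem_map.mp hz with ⟨r, _, rfl⟩
        simp [hp]
      rw [hdrop]
      simp [hp, ih]

theorem collect_singletons (M : List (List (String × Int) × Int)) (f : List (String × Int) × Int → Int)
    (k : List (String × Int)) :
    collectL (M.map (fun q => (q.1, [f q]))) k = (M.filter (fun q => decide (q.1 = k))).map f := by
  induction M with
  | nil => rfl
  | cons q t ih =>
    simp only [List.map_cons, collectL, List.filter_cons] at *
    by_cases hq : q.1 = k
    · simp [hq, ih]
    · simp [hq, ih]

-- ---- Dict facts ----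
theorem dict_ofList_items {κ ν : Type} [BEq κ] [LawfulBEq κ] (ps : List (κ × ν))
    (h : (ps.map Prod.fst).Nodup) : (PySem.Dict.ofList ps).items = ps := by
  have haux : ∀ (ps : List (κ × ν)) (d : PySem.Dict κ ν),
      ((d.items ++ ps).map Prod.fst).Nodup → (d.update ps).items = d.items ++ ps := by
    intro ps
    induction ps with
    | nil => intro d _; simp [PySem.Dict.update]
    | cons p t ih =>
      intro d hh
      have hp1 : p.1 ∉ d.items.map Prod.fst := by
        simp only [List.map_append, List.map_cons] at hh
        have hdisj := (List.nodup_append.mp hh).2.2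
        intro hmem
        exact hdisj p.1 hmem p.1 List.mem_cons_self rfl
      have hnc : d.contains p.1 = false := by
        simp only [PySem.Dict.contains]
        apply List.any_eq_false.mpr
        intro e he hbe
        exact hp1 (List.mem_map.mpr ⟨e, he, eq_of_beq hbe⟩)
      have hins : (d.insert p.1 p.2).items = d.items ++ [p] := by
        simp [PySem.Dict.insert, hnc]
      have hstep : d.update (p :: t) = (d.insert p.1 p.2).update t := rfl
      have hnd2 : (((d.insert p.1 p.2).items ++ t).map Prod.fst).Nodup := by
        rw [hins, ← List.append_cons]; exact hh
      rw [hstep, ih _ hnd2, hins, ← List.append_cons]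
  have := haux ps PySem.Dict.empty (by simpa [PySem.Dict.empty] using h)
  simpa [PySem.Dict.ofList, PySem.Dict.empty] using this

theorem dict_filter_of_not_contains {κ ν : Type} [BEq κ] [LawfulBEq κ] (d : PySem.Dict κ ν) (k : κ)
    (h : d.contains k = false) : d.items.filter (fun p => !(p.1 == k)) = d.items := by
  apply List.filter_eq_self.mpr
  intro a ha
  have h2 : ∀ x ∈ d.items, ¬ (x.1 == k) = true := by
    simpa [PySem.Dict.contains, List.any_eq_true] using h
  simpa using h2 a ha

theorem find_of_mem_nodup {κ ν : Type} [BEq κ] [LawfulBEq κ] (l : List (κ × ν))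
    (hnd : (l.map Prod.fst).Nodup) (e : κ × ν) (he : e ∈ l) :
    l.find? (fun p => p.1 == e.1) = some e := by
  induction l with
  | nil => simp at he
  | cons a t ih =>
    rcases List.mem_cons.mp he with rfl | hmem
    · simp [List.find?_cons_of_pos]
    · have hne : (a.1 == e.1) = false := by
        apply beq_eq_false_iff_ne.mpr
        intro hae
        have : e.1 ∈ t.map Prod.fst := List.mem_map.mpr ⟨e, hmem, rfl⟩
        rw [← hae] at this
        exact (List.nodup_cons.mp (by simpa using hnd)).1 this
      rw [List.find?_cons_of_neg (by simp [hne])]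
      exact ih (List.nodup_cons.mp (by simpa using hnd)).2 hmem

theorem getD_of_mem_nodup {κ ν : Type} [BEq κ] [LawfulBEq κ] (d : PySem.Dict κ ν)
    (hnd : (d.items.map Prod.fst).Nodup) (e : κ × ν) (he : e ∈ d.items) (dflt : ν) :
    d.getD e.1 dflt = e.2 := by
  simp [PySem.Dict.getD, PySem.Dict.get?, find_of_mem_nodup d.items hnd e he]

theorem items_insert_pos {κ ν : Type} [BEq κ] (d : PySem.Dict κ ν) (k : κ) (v : ν)
    (hc : d.contains k = true) :
    (d.insert k v).items = d.items.map (fun e => if (e.1 == k) = true then (k, v) else e) := by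
  simp [PySem.Dict.insert, hc]

theorem gstep_contains (g : PySem.Dict (List (String × Int)) (List Int))
    (p : List (String × Int) × List Int) (k : List (String × Int)) :
    (gstep g p).contains k = (g.contains k || k == p.1) := by
  unfold gstep
  by_cases hc : g.contains p.1
  · rw [if_pos hc, PySem.Dict.contains_insert, Bool.or_comm]
  · rw [if_neg hc, PySem.Dict.contains_insert, PySem.Dict.contains_insert]
    by_cases hk : k = p.1 <;> simp [hk, Bool.or_comm]

theorem gstep_items_contains (g : PySem.Dict (List (String × Int)) (List Int))
    (p : List (String × Int) × List Int) (hc : g.contains p.1 = true)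
    (hnd : (g.items.map Prod.fst).Nodup) :
    (gstep g p).items = g.items.map (fun e => if e.1 = p.1 then (p.1, e.2 ++ p.2) else e) := by
  obtain ⟨e0, he0, hbe⟩ := List.any_eq_true.mp
    (show g.items.any (fun e => e.1 == p.1) = true from hc)
  have he0k : e0.1 = p.1 := by simpa using hbe
  have hgd : g.getD p.1 [] = e0.2 := by
    have := getD_of_mem_nodup g hnd e0 he0 []
    rw [he0k] at this; exact this
  unfold gstep
  rw [if_pos hc]
  show (g.insert p.1 (g.getD p.1 [] ++ p.2)).items = _
  rw [hgd, items_insert_pos _ _ _ hc]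
  apply List.map_congr_left
  intro e he
  by_cases hek : e.1 = p.1
  · have hee0 : e = e0 := by
      have h1 := find_of_mem_nodup g.items hnd e he
      have h2 := find_of_mem_nodup g.items hnd e0 he0
      rw [he0k] at h2; rw [hek] at h1
      rw [h1] at h2
      exact Option.some_inj.mp h2
    simp [hek, hee0]
  · simp [hek]

theorem gstep_items_new (g : PySem.Dict (List (String × Int)) (List Int))
    (p : List (String × Int) × List Int) (hc : g.contains p.1 = false) :
    (gstep g p).items = g.items ++ [(p.1, p.2)] := by
  have hall : ∀ e ∈ g.items, (e.1 == p.1) = false := by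
    intro e he
    have := List.any_eq_false.mp
      (show g.items.any (fun e => e.1 == p.1) = false from hc) e he
    simpa using this
  have hfn : g.items.find? (fun e => e.1 == p.1) = none :=
    List.find?_eq_none.mpr (fun x hx => by simp [hall x hx])
  have hi1 : (g.insert p.1 []).items = g.items ++ [(p.1, ([] : List Int))] := by
    simp [PySem.Dict.insert, hc]
  have hc1 : (g.insert p.1 []).contains p.1 = true := by
    simp [PySem.Dict.contains, hi1]
  have hgd : (g.insert p.1 []).getD p.1 ([] : List Int) = [] := by
    simp [PySem.Dict.getD, PySem.Dict.get?, hi1, List.find?_append, hfn]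
  unfold gstep
  rw [if_neg (by simp [hc])]
  show ((g.insert p.1 []).insert p.1 ((g.insert p.1 []).getD p.1 [] ++ p.2)).items = _
  rw [hgd, items_insert_pos _ _ _ hc1, hi1, List.map_append]
  simp only [List.nil_append]
  have h1 : g.items.map (fun e => if (e.1 == p.1) = true then (p.1, p.2) else e) = g.items := by
    have := List.map_congr_left (l := g.items)
      (f := fun e => if (e.1 == p.1) = true then (p.1, p.2) else e) (g := fun e => e)
      (fun e he => by simp [hall e he])
    rw [this, List.map_id']
  rw [h1]
  simp

-- ---- the grouping fold ----
theorem groupFold_items (L : List (List (String × Int) × List Int)) :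
    ∀ (g : PySem.Dict (List (String × Int)) (List Int)), (g.items.map Prod.fst).Nodup →
    (L.foldl gstep g).items =
      g.items.map (fun e => (e.1, e.2 ++ collectL L e.1)) ++
      ((firsts (L.map Prod.fst)).filter (fun k => !(g.contains k))).map (fun k => (k, collectL L k)) := by
  induction L with
  | nil =>
    intro g _
    simp [collectL, firsts]
  | cons p t ih =>
    intro g hnd
    have hsec : ∀ (g' : PySem.Dict (List (String × Int)) (List Int)),
        ((firsts (t.map Prod.fst)).filter (fun k => !(gstep g' p).contains k)).map
            (fun k => (k, collectL t k)) =
          (((firsts (t.map Prod.fst)).filter (fun y => decide (y ≠ p.1))).filter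
              (fun k => !(g'.contains k))).map (fun k => (k, collectL (p :: t) k)) := by
      intro g'
      rw [List.filter_filter]
      have hpred : ∀ k ∈ firsts (t.map Prod.fst),
          (!(gstep g' p).contains k) = ((!g'.contains k) && decide (k ≠ p.1)) := by
        intro k _
        rw [gstep_contains]
        by_cases hk : k = p.1
        · simp [hk]
        · simp [hk]
      rw [List.filter_congr hpred]
      apply List.map_congr_left
      intro k hk
      have hknp : k ≠ p.1 := by
        have h2 := (List.mem_filter.mp hk).2
        simp at h2
        exact h2.2
      have hcol : collectL (p :: t) k = collectL t k := by
        simp only [collectL, List.filter_cons, decide_eq_true_eq]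
        rw [if_neg (fun h : p.1 = k => hknp h.symm)]
      rw [hcol]
    have hnd2 : ((gstep g p).items.map Prod.fst).Nodup := by
      by_cases hc : g.contains p.1
      · rw [gstep_items_contains g p hc hnd, List.map_map]
        have hco : ((fun (e : List (String × Int) × List Int) => e.1) ∘
            (fun e => if e.1 = p.1 then (p.1, e.2 ++ p.2) else e)) =
            (fun (e : List (String × Int) × List Int) => e.1) := by
          funext e; by_cases hek : e.1 = p.1 <;> simp [hek]
        rw [show (Prod.fst ∘ fun (e : List (String × Int) × List Int) =>
            if e.1 = p.1 then (p.1, e.2 ++ p.2) else e) =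
            (fun (e : List (String × Int) × List Int) => e.1) from hco]
        exact hnd
      · have hcF0 : g.contains p.1 = false := by
          cases hcb : g.contains p.1
          · rfl
          · exact absurd hcb hc
        rw [gstep_items_new g p hcF0, List.map_append]
        refine List.nodup_append.mpr ⟨hnd, by simp, ?_⟩
        intro a ha b hb
        simp only [List.map_cons, List.map_nil, List.mem_singleton] at hb
        subst hb
        rcases List.mem_map.mp ha with ⟨e, he, rfl⟩
        have := List.any_eq_false.mp
          (show g.items.any (fun e => e.1 == p.1) = false from hcF0) e he
        simpa using this
    simp only [List.foldl_cons]
    rw [ih (gstep g p) hnd2]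
    by_cases hc : g.contains p.1
    · rw [gstep_items_contains g p hc hnd]
      have hffst : firsts ((p :: t).map Prod.fst) =
          p.1 :: (firsts (t.map Prod.fst)).filter (fun y => decide (y ≠ p.1)) := rfl
      rw [hffst, List.filter_cons]
      simp only [hc, Bool.not_true]
      rw [if_neg (by simp)]
      rw [hsec g]
      congr 1
      rw [List.map_map]
      apply List.map_congr_left
      intro e he
      by_cases hek : e.1 = p.1
      · have hcol : collectL (p :: t) p.1 = p.2 ++ collectL t p.1 := by
          simp only [collectL, List.filter_cons, decide_eq_true_eq, if_true, List.flatMap_cons]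
        simp [Function.comp, hek, hcol, List.append_assoc]
      · have hcol : collectL (p :: t) e.1 = collectL t e.1 := by
          simp only [collectL, List.filter_cons, decide_eq_true_eq]
          rw [if_neg (fun h : p.1 = e.1 => hek h.symm)]
        simp [Function.comp, hek, hcol]
    · have hcF : g.contains p.1 = false := by
        cases hcb : g.contains p.1
        · rfl
        · exact absurd hcb hc
      rw [gstep_items_new g p hcF, List.map_append]
      have hffst : firsts ((p :: t).map Prod.fst) =
          p.1 :: (firsts (t.map Prod.fst)).filter (fun y => decide (y ≠ p.1)) := rfl
      rw [hffst, List.filter_cons]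
      rw [if_pos (by simp [hcF])]
      rw [hsec g]
      simp only [List.map_cons, List.map_nil, List.singleton_append, List.append_assoc,
        List.nil_append]
      congr 1
      · apply List.map_congr_left
        intro e he
        have hek : e.1 ≠ p.1 := by
          intro hek
          have hbe : (e.1 == p.1) = true := by simp [hek]
          have hfalse := List.any_eq_false.mp
            (show g.items.any (fun e => e.1 == p.1) = false from hcF) e he
          exact hfalse hbe
        have hcol : collectL (p :: t) e.1 = collectL t e.1 := by
          simp only [collectL, List.filter_cons, decide_eq_true_eq]
          rw [if_neg (fun h : p.1 = e.1 => hek h.symm)]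
        rw [hcol]
      · have hcol : collectL (p :: t) p.1 = p.2 ++ collectL t p.1 := by
          simp only [collectL, List.filter_cons, decide_eq_true_eq, if_true, List.flatMap_cons]
        rw [hcol]

theorem groupFold_items_empty (L : List (List (String × Int) × List Int)) :
    (L.foldl gstep PySem.Dict.empty).items =
      (firsts (L.map Prod.fst)).map (fun k => (k, collectL L k)) := by
  rw [groupFold_items L PySem.Dict.empty (by simp [PySem.Dict.empty])]
  simp [PySem.Dict.empty, PySem.Dict.contains]

-- ---- pyProd / pyBuild structure ----
theorem pyProd_length_mem {ls : List (List Int)} {v : List Int} (h : v ∈ pyProd ls) :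
    v.length = ls.length := by
  induction ls generalizing v with
  | nil => simp [pyProd] at h; simp [h]
  | cons l t ih =>
    simp only [pyProd, List.mem_flatMap, List.mem_map] at h
    obtain ⟨x, _, c, hc, rfl⟩ := h
    simp [ih hc]

theorem pyBuild_len (axes : List (String × List Int)) :
    (pyBuild axes).2 = ((pyProd (axes.map Prod.snd)).length : Int) := by
  induction axes with
  | nil => rfl
  | cons a rest ih =>
    obtain ⟨k, vs⟩ := a
    simp only [pyBuild, List.map_cons]
    by_cases hn : vs.length = 0
    · have hvs : vs = [] := List.length_eq_zero_iff.mp hn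
      subst hvs
      simp [pyProd]
    · rw [if_neg hn]
      have hlen : ((vs.flatMap fun x =>
          (pyProd (rest.map Prod.snd)).map (fun c => x :: c)).length : Int)
          = (vs.length : Int) * ((pyProd (rest.map Prod.snd)).length : Int) := by
        rw [List.length_flatMap]
        have h2 : (vs.map fun x =>
            ((pyProd (rest.map Prod.snd)).map (fun c => x :: c)).length)
            = vs.map (fun _ => (pyProd (rest.map Prod.snd)).length) := by
          apply List.map_congr_left; intro x _; simp
        have h3 : vs.map (fun _ => (pyProd (rest.map Prod.snd)).length)
            = List.replicate vs.length (pyProd (rest.map Prod.snd)).length := by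
          induction vs with
          | nil => rfl
          | cons y ys ihv => simp [List.replicate_succ, ihv]
        rw [h2, h3, List.sum_replicate, smul_eq_mul]
        push_cast; ring
      by_cases hk : k = "seed" <;> simp [hk, pyProd, ih, hlen]

theorem pyBuild_nil_iff (axes : List (String × List Int)) :
    ((pyBuild axes).1 = []) ↔ (pyProd (axes.map Prod.snd) = []) := by
  induction axes with
  | nil => simp [pyBuild, pyProd]
  | cons a rest ih =>
    obtain ⟨k, vs⟩ := a
    simp only [pyBuild, List.map_cons, pyProd]
    by_cases hn : vs.length = 0
    · have hvs : vs = [] := List.length_eq_zero_iff.mp hn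
      subst hvs
      simp
    · rw [if_neg hn]
      have hvs : vs ≠ [] := fun h => hn (by simp [h])
      have hflat : (vs.flatMap fun x =>
          (pyProd (rest.map Prod.snd)).map (fun c => x :: c)) = [] ↔
          pyProd (rest.map Prod.snd) = [] := by
        rw [List.flatMap_eq_nil_iff]
        constructor
        · intro hall
          obtain ⟨x, hx⟩ := List.exists_mem_of_ne_nil vs hvs
          have := hall x hx
          exact List.map_eq_nil_iff.mp this
        · intro hp x _
          simp [hp]
      rw [hflat]
      by_cases hk : k = "seed"
      · simp [hk, List.map_eq_nil_iff, ih]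
      · rcases hvs' : vs with _ | ⟨y, t⟩
        · exact absurd hvs' hvs
        · rw [if_neg hk]
          constructor
          · intro hB
            rw [List.flatMap_eq_nil_iff] at hB
            have h1 := hB (0, y) (by rw [enumerate_cons]; exact List.mem_cons_self)
            exact ih.mp (List.map_eq_nil_iff.mp h1)
          · intro hP
            have hg : (pyBuild rest).1 = [] := ih.mpr hP
            simp [hg]

theorem fst_mem_of_mem_zip {α β : Type} {l1 : List α} {l2 : List β} {q : α × β}
    (h : q ∈ l1.zip l2) : q.1 ∈ l1 := by
  induction l1 generalizing l2 with
  | nil => simp at h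
  | cons a t ih =>
    cases l2 with
    | nil => simp at h
    | cons b t2 =>
      rcases List.mem_cons.mp h with h1 | h1
      · subst h1; exact List.mem_cons_self
      · exact List.mem_cons_of_mem _ (ih h1)

theorem tagIdx_eq_enum {α : Type} (l : List α) (f : α → List (String × Int)) (s : Int) :
    tagIdx (l.map f) s = (PySem.List.enumerate l s).map (fun p => (f p.2, p.1)) := by
  induction l generalizing s with
  | nil => rfl
  | cons x t ih => simp [tagIdx, enumerate_cons, ih]

theorem keyA_mem_props (axes : List (String × List Int)) (v : List Int) (q : String × Int)
    (hq : q ∈ keyA (axes.map Prod.fst) v) : q.1 ∈ axes.map Prod.fst ∧ q.1 ≠ "seed" := by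
  have hq1 := mem_sortK.mp hq
  have hq2 := List.mem_filter.mp hq1
  refine ⟨fst_mem_of_mem_zip hq2.1, by simpa using hq2.2⟩

theorem keyA_sortK_fix (keys : List String) (v : List Int) : sortK (keyA keys v) = keyA keys v := sortK_sortK _

theorem flatMap_congr_fun {α γ : Type} (l : List α) (f g : α → List γ)
    (h : ∀ x ∈ l, f x = g x) : l.flatMap f = l.flatMap g := by
  induction l with
  | nil => rfl
  | cons a t ih =>
    simp only [List.flatMap_cons]
    rw [h a List.mem_cons_self, ih (fun x hx => h x (List.mem_cons_of_mem _ hx))]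

theorem flatMap_eq_flatten_map {γ δ : Type} (m : List γ) (F : γ → List δ) :
    m.flatMap F = (m.map F).flatten := by
  induction m with
  | nil => rfl
  | cons a t ih => simp [ih]

theorem KA_cons_seed (vs : List Int) (rest : List (String × List Int)) :
    KA (("seed", vs) :: rest) = vs.flatMap (fun _ => KA rest) := by
  simp only [KA, List.map_cons, pyProd, List.map_flatMap, List.flatMap_map]
  apply flatMap_congr_fun
  intro x _
  rw [List.map_map]
  apply List.map_congr_left
  intro c _
  simp [keyA, List.zip_cons_cons, List.filter_cons]

theorem KA_cons_key (k : String) (vs : List Int) (rest : List (String × List Int))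
    (hk : k ≠ "seed") :
    KA ((k, vs) :: rest) =
      vs.flatMap (fun x => (KA rest).map (fun K => sortK (K ++ [(k, x)]))) := by
  have hkb : (k == "seed") = false := beq_eq_false_iff_ne.mpr hk
  simp only [KA, List.map_cons, pyProd, List.map_flatMap, List.flatMap_map]
  apply flatMap_congr_fun
  intro x _
  rw [List.map_map, List.map_map]
  apply List.map_congr_left
  intro c _
  show keyA (k :: rest.map Prod.fst) (x :: c) = sortK (keyA (rest.map Prod.fst) c ++ [(k, x)])
  unfold keyA
  rw [List.zip_cons_cons, List.filter_cons]
  rw [if_pos (by simp [hkb])]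
  refine sortK_congr_perm ?_
  exact (List.Perm.cons _ (PySem.List.sorted_perm _ _ _).symm).trans
    (List.perm_append_singleton _ _).symm

theorem pyBuild_cons_seed (vs : List Int) (rest : List (String × List Int))
    (hn : ¬ vs.length = 0) :
    (pyBuild (("seed", vs) :: rest)).1 =
      (pyBuild rest).1.map (fun p => (p.1,
        (PySem.List.pyRange 0 (vs.length : Int) 1).flatMap
          (fun a => p.2.map (fun r => a * (pyBuild rest).2 + r)))) := by
  simp [pyBuild, hn]

theorem pyBuild_cons_key (k : String) (vs : List Int) (rest : List (String × List Int))
    (hn : ¬ vs.length = 0) (hk : k ≠ "seed") :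
    (pyBuild ((k, vs) :: rest)).1 =
      (PySem.List.enumerate vs 0).flatMap (fun ax => (pyBuild rest).1.map (fun p =>
        (sortK (p.1 ++ [(k, ax.2)]), p.2.map (fun r => ax.1 * (pyBuild rest).2 + r)))) := by
  simp only [pyBuild, if_neg hn, if_neg hk]
  apply flatMap_congr_fun
  intro ax _
  apply List.map_congr_left
  intro p _
  rw [sorted2_eq_sortK]

theorem KA_len (rest : List (String × List Int)) :
    ((KA rest).length : Int) = (pyBuild rest).2 := by
  rw [pyBuild_len]
  simp [KA]

-- the core step lemma shared by both sides of C1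
theorem C1_step_core (kk : String) (vs : List Int) (L : List (List (String × Int)))
    (hfix : ∀ K ∈ L, sortK K = K)
    (hfst : ∀ K ∈ L, ∀ q ∈ K, q.1 ≠ kk)
    (hLne : L ≠ []) :
    firsts (vs.flatMap (fun x => L.map (fun K => sortK (K ++ [(kk, x)])))) =
      (firsts vs).flatMap (fun x => (firsts L).map (fun K => sortK (K ++ [(kk, x)]))) := by
  have hmemT : ∀ (x : Int) (K : List (String × Int)), (kk, x) ∈ sortK (K ++ [(kk, x)]) :=
    fun x K => mem_sortK.mpr (by simp)
  have hmemT2 : ∀ (x : Int) (K : List (String × Int)), ∀ q ∈ sortK (K ++ [(kk, x)]),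
      q ∈ K ∨ q = (kk, x) := by
    intro x K q hq
    have := mem_sortK.mp hq
    simpa using this
  have hdistinct : ∀ x x' : Int, x ≠ x' → ∀ K ∈ L, ∀ K' ∈ L,
      sortK (K ++ [(kk, x)]) ≠ sortK (K' ++ [(kk, x')]) := by
    intro x x' hxx K hK K' hK' heq
    have h1 := hmemT x K
    rw [heq] at h1
    rcases hmemT2 x' K' _ h1 with h2 | h2
    · exact hfst K' hK' _ h2 rfl
    · have := congrArg Prod.snd h2
      simp at this
      exact hxx this
  have hTinj : ∀ x : Int, ∀ K ∈ L, ∀ K' ∈ L,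
      sortK (K ++ [(kk, x)]) = sortK (K' ++ [(kk, x)]) → K = K' := by
    intro x K hK K' hK' heq
    have p1 : (sortK (K ++ [(kk, x)])).Perm (K ++ [(kk, x)]) := PySem.List.sorted_perm _ _ _
    have p2 : (sortK (K' ++ [(kk, x)])).Perm (K' ++ [(kk, x)]) := PySem.List.sorted_perm _ _ _
    have hp : (K ++ [(kk, x)]).Perm (K' ++ [(kk, x)]) := p1.symm.trans (heq ▸ p2)
    have hKK' : K.Perm K' := (List.perm_append_right_iff [(kk, x)]).mp hp
    have h3 := sortK_congr_perm hKK'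
    rw [hfix K hK, hfix K' hK'] at h3
    exact h3
  rw [flatMap_eq_flatten_map vs _]
  rw [firsts_flatten]
  · have hB : firsts (vs.map (fun x => L.map (fun K => sortK (K ++ [(kk, x)])))) =
        (firsts vs).map (fun x => L.map (fun K => sortK (K ++ [(kk, x)]))) := by
      apply firsts_map_injOn
      intro x hx y hy hBxy
      by_contra hxy
      obtain ⟨K0, hK0⟩ := List.exists_mem_of_ne_nil L hLne
      have hmm : sortK (K0 ++ [(kk, x)]) ∈ L.map (fun K => sortK (K ++ [(kk, x)])) :=
        List.mem_map.mpr ⟨K0, hK0, rfl⟩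
      rw [hBxy] at hmm
      rcases List.mem_map.mp hmm with ⟨K1, hK1, hEq⟩
      exact hdistinct y x (fun h => hxy h.symm) K1 hK1 K0 hK0 hEq
    rw [hB, List.flatMap_map]
    apply flatMap_congr_fun
    intro x _
    exact firsts_map_injOn _ L (hTinj x)
  · intro b1 hb1 b2 hb2
    rcases List.mem_map.mp hb1 with ⟨x, hx, rfl⟩
    rcases List.mem_map.mp hb2 with ⟨y, hy, rfl⟩
    by_cases hxy : x = y
    · left; rw [hxy]
    · right
      intro z hz hz2
      rcases List.mem_map.mp hz with ⟨K, hK, rfl⟩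
      rcases List.mem_map.mp hz2 with ⟨K', hK', hEq⟩
      exact hdistinct y x (fun h => hxy h.symm) K' hK' K hK hEq

-- ---- the two main inductions ----
theorem pyBuild_keys_C1 (axes : List (String × List Int)) (hnd : (axes.map Prod.fst).Nodup) :
    firsts (KA axes) = firsts ((pyBuild axes).1.map Prod.fst) := by
  induction axes with
  | nil => rfl
  | cons a rest ih =>
    obtain ⟨k, vs⟩ := a
    have hnd' := hnd
    rw [List.map_cons] at hnd'
    have hndc := List.nodup_cons.mp hnd'
    have hndr : (rest.map Prod.fst).Nodup := hndc.2
    have hknotin : k ∉ rest.map Prod.fst := hndc.1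
    have ihr := ih hndr
    by_cases hn : vs.length = 0
    · have hvs : vs = [] := List.length_eq_zero_iff.mp hn
      subst hvs
      simp [KA, pyProd, pyBuild]
    · have hvs : vs ≠ [] := fun h => hn (by simp [h])
      by_cases hk : k = "seed"
      · subst hk
        rw [KA_cons_seed, firsts_flatMap_const vs _ hvs, ihr]
        rw [pyBuild_cons_seed vs rest hn, List.map_map]
        rfl
      · have hBK : ((pyBuild ((k, vs) :: rest)).1.map Prod.fst) =
            vs.flatMap (fun x => ((pyBuild rest).1.map Prod.fst).map
              (fun K => sortK (K ++ [(k, x)]))) := by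
          rw [pyBuild_cons_key k vs rest hn hk, List.map_flatMap]
          have hbody : ∀ ax ∈ PySem.List.enumerate vs 0,
              (((pyBuild rest).1.map (fun p =>
                (sortK (p.1 ++ [(k, ax.2)]), p.2.map (fun r => ax.1 * (pyBuild rest).2 + r)))).map
                  Prod.fst)
              = ((pyBuild rest).1.map Prod.fst).map (fun K => sortK (K ++ [(k, ax.2)])) := by
            intro ax _
            rw [List.map_map, List.map_map]
            rfl
          rw [flatMap_congr_fun _ _ _ hbody]
          exact flatMap_enumerate_snd vs
            (fun x => ((pyBuild rest).1.map Prod.fst).map (fun K => sortK (K ++ [(k, x)]))) 0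
        have hfixA : ∀ K ∈ KA rest, sortK K = K := by
          intro K hK
          rcases List.mem_map.mp hK with ⟨v, _, rfl⟩
          exact keyA_sortK_fix _ _
        have hfstA : ∀ K ∈ KA rest, ∀ q ∈ K, q.1 ≠ k := by
          intro K hK q hq
          rcases List.mem_map.mp hK with ⟨v, hv, rfl⟩
          have hp := keyA_mem_props rest v q hq
          intro hqk
          exact hknotin (hqk ▸ hp.1)
        have hmemBA : ∀ K ∈ (pyBuild rest).1.map Prod.fst, K ∈ KA rest := by
          intro K hK
          have h1 : K ∈ firsts ((pyBuild rest).1.map Prod.fst) := (mem_firsts _ _).mpr hK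
          rw [← ihr] at h1
          exact (mem_firsts _ _).mp h1
        have hfixB : ∀ K ∈ (pyBuild rest).1.map Prod.fst, sortK K = K :=
          fun K hK => hfixA K (hmemBA K hK)
        have hfstB : ∀ K ∈ (pyBuild rest).1.map Prod.fst, ∀ q ∈ K, q.1 ≠ k :=
          fun K hK => hfstA K (hmemBA K hK)
        by_cases hLnil : KA rest = []
        · have hBnil : (pyBuild rest).1 = [] := by
            rw [pyBuild_nil_iff]
            exact List.map_eq_nil_iff.mp hLnil
          rw [KA_cons_key k vs rest hk, hBK, hBnil, hLnil]
          simp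
        · have hBnnil : (pyBuild rest).1.map Prod.fst ≠ [] := by
            intro h0
            have h1 : (pyBuild rest).1 = [] := List.map_eq_nil_iff.mp h0
            rw [pyBuild_nil_iff] at h1
            exact hLnil (by simp [KA, h1])
          rw [KA_cons_key k vs rest hk, hBK,
            C1_step_core k vs (KA rest) hfixA hfstA hLnil,
            C1_step_core k vs ((pyBuild rest).1.map Prod.fst) hfixB hfstB hBnnil, ihr]

theorem pyBuild_perm_C2 (axes : List (String × List Int)) (hnd : (axes.map Prod.fst).Nodup) :
    (expandG (pyBuild axes).1).Perm (tagIdx (KA axes) 0) := by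
  induction axes with
  | nil => exact List.Perm.refl _
  | cons a rest ih =>
    obtain ⟨k, vs⟩ := a
    have hnd' := hnd
    rw [List.map_cons] at hnd'
    have hndr : (rest.map Prod.fst).Nodup := (List.nodup_cons.mp hnd').2
    have ihr := ih hndr
    by_cases hn : vs.length = 0
    · have hvs : vs = [] := List.length_eq_zero_iff.mp hn
      subst hvs
      show (expandG (pyBuild (((k, []) : String × List Int) :: rest)).1).Perm _
      have h1 : (pyBuild ((k, ([] : List Int)) :: rest)).1 = [] := by simp [pyBuild]
      have h2 : KA ((k, ([] : List Int)) :: rest) = [] := by simp [KA, pyProd]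
      rw [h1, h2]
      exact List.Perm.refl _
    · have hlen : ∀ x ∈ vs, ((KA rest).length : Int) = (pyBuild rest).2 :=
        fun x _ => KA_len rest
      by_cases hk : k = "seed"
      · subst hk
        have hA : expandG (pyBuild (("seed", vs) :: rest)).1 =
            (pyBuild rest).1.flatMap (fun p =>
              (PySem.List.pyRange 0 (vs.length : Int) 1).flatMap
                (fun a => p.2.map (fun r => (p.1, a * (pyBuild rest).2 + r)))) := by
          rw [pyBuild_cons_seed vs rest hn]
          simp only [expandG, List.flatMap_map]
          apply flatMap_congr_fun
          intro p _
          simp only [List.map_flatMap, List.map_map]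
          apply flatMap_congr_fun
          intro a _
          rfl
        have hR : tagIdx (KA (("seed", vs) :: rest)) 0 =
            (PySem.List.pyRange 0 (vs.length : Int) 1).flatMap
              (fun a => (tagIdx (KA rest) 0).map
                (fun q => (q.1, a * (pyBuild rest).2 + q.2))) := by
          rw [KA_cons_seed]
          have htf := tag_flatMap_enum vs (fun _ => KA rest) ((pyBuild rest).2) hlen 0
          rw [zero_mul] at htf
          rw [htf]
          have hfe := flatMap_enumerate_fst vs
            (fun a => tagIdx (KA rest) (a * (pyBuild rest).2)) 0
          rw [hfe]
          have h0 : (0 : Int) + (vs.length : Int) = (vs.length : Int) := by ring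
          rw [h0]
          apply flatMap_congr_fun
          intro a _
          rw [tagIdx_shift (KA rest) (a * (pyBuild rest).2)]
        rw [hA, hR]
        refine (perm_flatMap_swap _ _ _).trans ?_
        apply flatMap_perm_congr
        intro a _
        have hmap : (pyBuild rest).1.flatMap
            (fun p => p.2.map (fun r => (p.1, a * (pyBuild rest).2 + r))) =
            (expandG (pyBuild rest).1).map (fun q => (q.1, a * (pyBuild rest).2 + q.2)) := by
          simp only [expandG, List.map_flatMap, List.map_map]
          apply flatMap_congr_fun
          intro p _
          rfl
        rw [hmap]
        exact ihr.map _
      · have hA : expandG (pyBuild ((k, vs) :: rest)).1 =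
            (PySem.List.enumerate vs 0).flatMap (fun ax =>
              (expandG (pyBuild rest).1).map
                (fun q => (sortK (q.1 ++ [(k, ax.2)]), ax.1 * (pyBuild rest).2 + q.2))) := by
          rw [pyBuild_cons_key k vs rest hn hk, expand_flatMap]
          apply flatMap_congr_fun
          intro ax _
          exact expand_map (pyBuild rest).1 (fun K => sortK (K ++ [(k, ax.2)]))
            (fun r => ax.1 * (pyBuild rest).2 + r)
        have hR : tagIdx (KA ((k, vs) :: rest)) 0 =
            (PySem.List.enumerate vs 0).flatMap (fun ax =>
              (tagIdx (KA rest) 0).map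
                (fun q => (sortK (q.1 ++ [(k, ax.2)]), ax.1 * (pyBuild rest).2 + q.2))) := by
          rw [KA_cons_key k vs rest hk]
          have htf := tag_flatMap_enum vs
            (fun x => (KA rest).map (fun K => sortK (K ++ [(k, x)])))
            ((pyBuild rest).2) (fun x hx => by simpa using hlen x hx) 0
          rw [zero_mul] at htf
          rw [htf]
          apply flatMap_congr_fun
          intro ax _
          rw [tagIdx_map, tagIdx_shift (KA rest) (ax.1 * (pyBuild rest).2), List.map_map]
          rfl
        rw [hA, hR]
        apply flatMap_perm_congr
        intro ax _
        exact ihr.map _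

-- ---- assembly ----
theorem A_items (grid : List (String × List Int)) (s : Int) (hnd : (grid.map Prod.fst).Nodup) :
    group_configs grid s =
      (firsts (KA grid)).map (fun k =>
        (k, ((tagIdx (KA grid) 0).filter (fun q => decide (q.1 = k))).map (fun q => q.2 + s))) := by
  have hfold : group_configs grid s =
      ((PySem.List.enumerate ((pyProd (grid.map Prod.snd)).map
          (fun v => PySem.Dict.ofList ((grid.map Prod.fst).zip v))) 0).foldl
        (fun g (ie : Int × PySem.Dict String Int) =>
          let expCopy := if ie.2.contains "seed" then ie.2.erase "seed" else ie.2
          let key := PySem.List.sorted2 expCopy.items Prod.fst Prod.snd false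
          let g1 := if g.contains key then g else g.insert key []
          g1.insert key (g1.getD key [] ++ [ie.1 + s])) PySem.Dict.empty).items := rfl
  have hkey : ∀ ie ∈ PySem.List.enumerate (pyProd (grid.map Prod.snd)) 0,
      PySem.List.sorted2 (if (PySem.Dict.ofList ((grid.map Prod.fst).zip ie.2)).contains "seed"
          then (PySem.Dict.ofList ((grid.map Prod.fst).zip ie.2)).erase "seed"
          else PySem.Dict.ofList ((grid.map Prod.fst).zip ie.2)).items Prod.fst Prod.snd false
        = keyA (grid.map Prod.fst) ie.2 := by
    intro ie hie
    have hv : ie.2 ∈ pyProd (grid.map Prod.snd) := enumerate_mem_snd hie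
    have hlen : ie.2.length = (grid.map Prod.snd).length := pyProd_length_mem hv
    have hle : (grid.map Prod.fst).length ≤ ie.2.length := by simp [hlen]
    have hzf : ((grid.map Prod.fst).zip ie.2).map Prod.fst = grid.map Prod.fst :=
      List.map_fst_zip hle
    have hofl : (PySem.Dict.ofList ((grid.map Prod.fst).zip ie.2)).items =
        (grid.map Prod.fst).zip ie.2 := dict_ofList_items _ (by rw [hzf]; exact hnd)
    have hec : (if (PySem.Dict.ofList ((grid.map Prod.fst).zip ie.2)).contains "seed"
          then (PySem.Dict.ofList ((grid.map Prod.fst).zip ie.2)).erase "seed"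
          else PySem.Dict.ofList ((grid.map Prod.fst).zip ie.2)).items =
        ((grid.map Prod.fst).zip ie.2).filter (fun q => !(q.1 == "seed")) := by
      by_cases hs : (PySem.Dict.ofList ((grid.map Prod.fst).zip ie.2)).contains "seed"
      · rw [if_pos hs]; simp [PySem.Dict.erase, hofl]
      · rw [if_neg hs, hofl]
        have h3 := dict_filter_of_not_contains
          (PySem.Dict.ofList ((grid.map Prod.fst).zip ie.2)) "seed" (by simpa using hs)
        rw [hofl] at h3
        exact h3.symm
    rw [hec, sorted2_eq_sortK]
    rfl
  have hfold2 : group_configs grid s =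
      ((PySem.List.enumerate (pyProd (grid.map Prod.snd)) 0).foldl
        (fun g ie => gstep g (keyA (grid.map Prod.fst) ie.2, [ie.1 + s])) PySem.Dict.empty).items := by
    rw [hfold, enumerate_map, List.foldl_map]
    congr 1
    apply PySem.List.foldl_congr_mem
    intro acc ie hie
    have hk := hkey ie hie
    dsimp only
    rw [hk]
    rfl
  have hmapform : (PySem.List.enumerate (pyProd (grid.map Prod.snd)) 0).foldl
        (fun g ie => gstep g (keyA (grid.map Prod.fst) ie.2, [ie.1 + s])) PySem.Dict.empty
      = ((tagIdx (KA grid) 0).map (fun q => (q.1, [q.2 + s]))).foldl gstep PySem.Dict.empty := by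
    have hka : tagIdx (KA grid) 0 =
        (PySem.List.enumerate (pyProd (grid.map Prod.snd)) 0).map (fun p => (keyA (grid.map Prod.fst) p.2, p.1)) :=
      tagIdx_eq_enum (pyProd (grid.map Prod.snd)) (keyA (grid.map Prod.fst)) 0
    rw [hka, List.map_map, List.foldl_map]
    rfl
  rw [hfold2, hmapform, groupFold_items_empty]
  have hfst : (((tagIdx (KA grid) 0).map (fun q => (q.1, [q.2 + s]))).map Prod.fst) = KA grid := by
    rw [List.map_map]
    have : (Prod.fst ∘ fun (q : List (String × Int) × Int) => (q.1, [q.2 + s])) =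
        (fun (q : List (String × Int) × Int) => q.1) := rfl
    rw [this, map_fst_tagIdx]
  rw [hfst]
  apply List.map_congr_left
  intro k _
  rw [collect_singletons]

theorem B_items (grid : List (String × List Int)) (s : Int) :
    group_configs_alt grid s =
      (firsts ((pyBuild grid).1.map Prod.fst)).map (fun k =>
        (k, PySem.List.sorted ((collectL (pyBuild grid).1 k).map (fun r => s + r)) (fun x => x) false)) := by
  have hfold : group_configs_alt grid s =
      ((pyBuild grid).1.foldl gstep PySem.Dict.empty).items.map
        (fun p => (p.1, PySem.List.sorted (p.2.map (fun r => s + r)) (fun x => x) false)) := rfl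
  rw [hfold, groupFold_items_empty, List.map_map]
  rfl

-- ===== VERDICT (by name: the statement is the Claim_ definition above) =====
theorem group_configs_spec : Claim_equal_group_configs := by
  intro grid s _hdom hpre
  unfold Spec_group_configs
  obtain ⟨hne, hnd⟩ := hpre
  rw [A_items grid s hnd, B_items grid s, ← pyBuild_keys_C1 grid hnd]
  apply List.map_congr_left
  intro k _
  refine congrArg (fun z => (k, z)) ?_
  have hperm : (((tagIdx (KA grid) 0).filter (fun q => decide (q.1 = k))).map (fun q => q.2 + s)).Perm
      ((collectL (pyBuild grid).1 k).map (fun r => s + r)) := by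
    have h2 := (pyBuild_perm_C2 grid hnd).filter (fun q => decide (q.1 = k))
    have h3 := h2.map (fun q : (List (String × Int) × Int) => q.2 + s)
    have hx : (((expandG (pyBuild grid).1).filter (fun q => decide (q.1 = k))).map
        (fun q : (List (String × Int) × Int) => q.2 + s)) = (collectL (pyBuild grid).1 k).map (fun r => s + r) := by
      rw [← collect_expand (pyBuild grid).1 k, List.map_map]
      apply List.map_congr_left
      intro a _
      show a.2 + s = s + a.2
      omega
    rw [hx] at h3
    exact h3.symm
  have hpw : (((tagIdx (KA grid) 0).filter (fun q => decide (q.1 = k))).map (fun q : (List (String × Int) × Int) => q.2 + s)).Pairwise (fun a b => a < b) := by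
    have h0 : ((tagIdx (KA grid) 0).filter (fun q => decide (q.1 = k))).Pairwise (fun p q => p.2 < q.2) :=
      (tagIdx_pairwise (KA grid) 0).sublist List.filter_sublist
    exact List.Pairwise.map _ (fun a b hab => by omega) h0
  exact (PySem.List.sorted_eq_of_perm_of_pairwise_lt _ _ (fun x => x) hperm hpw).symm
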